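-- pv_equiv track=rewrite | github.com/MohammadRezaQaderi/ColorfulCardGame | P3-1.py | check_heuristic
-- ===== SOURCE A (Python) =====
-- def check_sorted(number_card):
--     flag = 0
--     test_number_card = number_card[:]
--     # test_number_card.sort()
--     test_number_card.sort(reverse = True)
--     if(len(number_card) == 0):
--         flag = 0
--     if (test_number_card == number_card):
--         flag = 1
--     if(flag):
--         return True
--     else:
--         return False
--
-- def check_color(color_card):
--     flag = 0
--     if(len(color_card) == 0):
--         flag = 0
--     if len(color_card) >0 :
--         flag = all(element == color_card[0] for element in color_card)
--     if(flag):
--         return True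
--     else:
--         return False
--
-- def check_heuristic(node):
--     hit = 0
--     for i in range(len(node)):
--         if(len(node[i]) == 0):
--             break
--         if(not check_color(node[i]) or not check_sorted(node[i])):
--                 hit+=1
--     return hit
-- ===== SOURCE B (Python) =====
-- def check_heuristic(node):
--     hit = 0
--     for stack in node:
--         if not stack:
--             break
--         if stack.count(stack[0]) != len(stack):
--             hit += 1
--     return hit
-- ===== Notes on version B (the rewrite author's own statement) =====
-- stated objective: faster
-- what changed: Replaces the per-stack copy-sort-compare plus all-equal helper pair with one count of the first element per stack (a stack of equal cards is automatically descending, so equality of count with the length decides both checks).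
import Mathlib
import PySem

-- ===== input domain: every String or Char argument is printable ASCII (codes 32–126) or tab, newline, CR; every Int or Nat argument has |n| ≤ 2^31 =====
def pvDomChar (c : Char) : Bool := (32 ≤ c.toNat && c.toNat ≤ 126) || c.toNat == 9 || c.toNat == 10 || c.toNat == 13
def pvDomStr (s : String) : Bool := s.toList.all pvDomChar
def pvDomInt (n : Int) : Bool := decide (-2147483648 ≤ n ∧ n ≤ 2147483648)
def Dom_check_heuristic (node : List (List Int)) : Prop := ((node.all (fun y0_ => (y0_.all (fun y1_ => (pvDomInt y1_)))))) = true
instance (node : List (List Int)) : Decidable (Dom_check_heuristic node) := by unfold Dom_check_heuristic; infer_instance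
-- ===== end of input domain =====

-- B replaces the per-stack sort-and-compare plus all-equal check by one linear scan
-- against the stack's first element (equal cards are automatically descending): faster.

-- ===== PORT A =====
def check_sorted (number_card : List Int) : Bool :=
  let flag : Int := 0
  let test_number_card := PySem.List.sorted number_card (fun x => x) true
  let flag := if number_card.length == 0 then (0 : Int) else flag
  let flag := if test_number_card == number_card then (1 : Int) else flag
  if flag != 0 then true else false

def check_color (color_card : List Int) : Bool :=
  let flag : Bool := false
  let flag := if color_card.length == 0 then false else flag
  let flag := if color_card.length > 0 then
      color_card.all (fun element => element == color_card.headD 0)   -- color_card[0], guarded by len > 0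
    else flag
  if flag then true else false

def checkHeuristicGo : List (List Int) → Int → Int
  | [], hit => hit
  | s :: rest, hit =>
    if s.length == 0 then hit
    else checkHeuristicGo rest (if !check_color s || !check_sorted s then hit + 1 else hit)

def check_heuristic (node : List (List Int)) : Int := checkHeuristicGo node 0

-- ===== PORT B =====
def checkHeuristicAltGo : List (List Int) → Int → Int
  | [], hit => hit
  | stack :: rest, hit =>
    if stack.isEmpty then hit
    else checkHeuristicAltGo rest
      (if PySem.List.count stack (stack.headD 0) != stack.length then hit + 1 else hit)

def check_heuristic_alt (node : List (List Int)) : Int := checkHeuristicAltGo node 0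

-- ===== PRECONDITION & SPEC =====
def Spec_check_heuristic (node : List (List Int)) (out : Int) : Prop := out = check_heuristic_alt node
instance (node : List (List Int)) (out : Int) : Decidable (Spec_check_heuristic node out) := by unfold Spec_check_heuristic; infer_instance

-- ===== CLAIM (what is proved, stated in full; the proofs are below) =====
def Claim_equal_check_heuristic : Prop := ∀ (node : List (List Int)), Dom_check_heuristic node → Spec_check_heuristic node (check_heuristic node)

-- ===== LEMMAS AND PROOFS =====

-- On a nonempty stack, A's combined test equals B's single scan.
theorem stack_test_eq (s : List Int) (hs : s ≠ []) :
    (!check_color s || !check_sorted s) = (PySem.List.count s (s.headD 0) != s.length) := by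
  obtain ⟨a, t, rfl⟩ := List.exists_cons_of_ne_nil hs
  rw [PySem.List.count_eq]
  by_cases h : ∀ x ∈ a :: t, x = a
  · -- all elements equal the head: count = length, check_color true, reverse sort is a fixpoint
    have hcnt : (a :: t).count ((a :: t).headD 0) = (a :: t).length := by
      simp only [List.headD_cons]
      exact List.count_eq_length.mpr (fun x hx => (h x hx).symm)
    have hcol : check_color (a :: t) = true := by
      simp only [check_color, List.length_cons]
      simp [List.all_eq_true]
      intro x hx
      exact h x (by simp [hx])
    have hsort : check_sorted (a :: t) = true := by
      simp only [check_sorted]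
      have hpw : (a :: t).Pairwise (fun p q : Int => ((fun x => x) q) ≤ ((fun x => x) p)) := by
        apply List.pairwise_of_forall_mem_list
        intro p hp q hq
        rw [h p hp, h q hq]
      rw [PySem.List.sorted_rev_eq_self_of_pairwise _ _ hpw]
      simp
    rw [hcol, hsort]
    simp only [Bool.not_true, Bool.or_self]
    exact (bne_eq_false_iff_eq.mpr hcnt).symm
  · -- some element differs from the head: count < length and check_color is false
    push Not at h
    obtain ⟨x, hx, hne⟩ := h
    have hcnt : (a :: t).count ((a :: t).headD 0) ≠ (a :: t).length := by
      simp only [List.headD_cons]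
      intro hc
      exact hne (List.count_eq_length.mp hc x hx).symm
    have hcol : check_color (a :: t) = false := by
      simp only [check_color, List.length_cons]
      simp [List.all_eq_true]
      refine ⟨x, ?_, hne⟩
      rcases List.mem_cons.mp hx with rfl | hx'
      · exact absurd rfl hne
      · exact hx'
    rw [hcol]
    simp only [Bool.not_false, Bool.true_or]
    exact (bne_iff_ne.mpr hcnt).symm

theorem go_eq (node : List (List Int)) : ∀ hit : Int,
    checkHeuristicGo node hit = checkHeuristicAltGo node hit := by
  induction node with
  | nil => intro hit; rfl
  | cons s rest ih =>
    intro hit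
    simp only [checkHeuristicGo, checkHeuristicAltGo]
    by_cases he : s = []
    · subst he; simp
    · have hlen : (s.length == 0) = false := by simp [he]
      have hemp : s.isEmpty = false := by simp [he]
      rw [hlen, hemp]
      simp only [Bool.false_eq_true, if_false]
      rw [stack_test_eq s he, ih]

-- ===== VERDICT (by name: the statement is the Claim_ definition above) =====
theorem check_heuristic_spec : Claim_equal_check_heuristic := by
  intro node _
  unfold Spec_check_heuristic check_heuristic check_heuristic_alt
  exact go_eq node 0
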